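-- pv_equiv track=rewrite | github.com/josiahadrineda/Daily-Coding-Problems | 269_Dominoes.py | dominoes
-- ===== SOURCE A (Python) =====
-- def dominoes(doms):
--     """Given a string of domino positions DOMS (L = pushed left, R = pushed right,
--     . = standing upright), determines the position of DOMS after the pushes.
--
--     >>> dominoes('.L.R....L')
--     'LL.RRRLLL'
--     >>> dominoes('..R...L.L')
--     '..RR.LLLL'
--     """
--     assert doms, 'DOMS cannot be an empty string.'
--
--     n = len(doms)
--     doms_list = list(doms)
--     next_state = []
--     while True:
--         for i, dom in enumerate(doms_list):
--             if dom in 'LR':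
--                 next_state.append(dom)
--             else:
--                 l, r = False, False
--                 if i + 1 < n and doms_list[i + 1] == 'L':
--                     l = True
--                 if i - 1 > 0 and doms_list[i - 1] == 'R':
--                     r = True
--
--                 if l and not r:
--                     next_state.append('L')
--                 elif not l and r:
--                     next_state.append('R')
--                 else:
--                     next_state.append('.')
--
--         if doms_list == next_state:
--             return ''.join(doms_list)
--         doms_list, next_state = list(next_state), []
-- ===== SOURCE B (Python) =====
-- def _fill(a, j, b):
--     """Fill a gap of j upright dominoes whose nearest forces are a (left) and b (right)."""
--     if a == 'R' and b == 'L':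
--         h, odd = divmod(j, 2)
--         return 'R' * h + '.' * odd + 'L' * h
--     if a == b:
--         return a * j
--     return '.' * j
--
--
-- def dominoes(doms):
--     # One pass over the segments between pushed dominoes; virtual walls 'L'
--     # on the left and 'R' on the right exert no force on the gaps they bound.
--     parts = []
--     prev, run = 'L', 0
--     for c in doms:
--         if c in 'LR':
--             parts.append(_fill(prev, run, c))
--             parts.append(c)
--             prev, run = c, 0
--         else:
--             run += 1
--     parts.append(_fill(prev, run, 'R'))
--     return ''.join(parts)
-- ===== Notes on version B (the rewrite author's own statement) =====
-- stated objective: faster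
-- what changed: B replaces A's repeated whole-string relaxation sweeps (iterate until fixpoint, O(n) sweeps of O(n)) by a single pass over the segments between pushed dominoes, filling each gap with a closed-form pattern (R-half/dot/L-half, all-R, all-L or all dots).
-- intended difference: On strings of length >= 2 whose first character is 'R' and whose second is not 'L'/'R', A's check 'i - 1 > 0' makes the leading R push nothing (e.g. A('R.') = 'R.'), while B lets it topple its gap (B('R.') = 'RR'), which is the intended dominoes behaviour. — e.g. on dominoes("R."): A returns "R.", B returns "RR"
import Mathlib
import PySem

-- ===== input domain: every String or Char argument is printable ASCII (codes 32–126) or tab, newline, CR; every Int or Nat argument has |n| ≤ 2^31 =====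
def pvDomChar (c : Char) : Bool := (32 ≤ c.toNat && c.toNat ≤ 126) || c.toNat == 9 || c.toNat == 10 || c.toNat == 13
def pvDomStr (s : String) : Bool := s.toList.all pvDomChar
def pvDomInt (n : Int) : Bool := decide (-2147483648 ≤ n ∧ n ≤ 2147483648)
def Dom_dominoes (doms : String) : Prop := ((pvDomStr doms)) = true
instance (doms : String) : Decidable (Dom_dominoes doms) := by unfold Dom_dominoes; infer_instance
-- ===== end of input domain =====

-- B replaces A's repeated whole-string relaxation sweeps by one closed-form pass over the
-- segments between pushed dominoes (objective: faster, O(n) instead of O(n^2)); on strings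
-- starting "R" + non-force character A's 'i - 1 > 0' off-by-one makes the leading R push
-- nothing, and B instead lets it fall (stated as the intended difference D_ below).

-- ===== PORT A =====
-- one cell of A's inner `for i, dom in enumerate(doms_list)` loop
def cellA (xs : List Char) (i : Int) (dom : Char) : Char :=
  if dom = 'L' ∨ dom = 'R' then dom
  else
    let l := decide (i + 1 < PySem.List.len xs) && (PySem.List.pyGetD xs (i + 1) ' ' == 'L')
    let r := decide (i - 1 > 0) && (PySem.List.pyGetD xs (i - 1) ' ' == 'R')
    if l && !r then 'L' else if r && !l then 'R' else '.'

-- `next_state = []; for i, dom in enumerate(doms_list): next_state.append(...)`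
def stepA (xs : List Char) : List Char :=
  (PySem.List.enumerate xs).foldl (fun ns p => ns ++ [cellA xs p.1 p.2]) []

-- A's `while True` loop; it stabilises within `length + 2` sweeps (proved below via
-- `iterW`), so the fuel is never exhausted on any input.
def loopA : Nat → List Char → List Char
  | 0, xs => xs
  | fuel + 1, xs =>
    let ns := stepA xs
    if xs = ns then xs else loopA fuel ns

def dominoes (doms : String) : String :=
  String.ofList (loopA (doms.toList.length + 2) doms.toList)

-- ===== PORT B =====
-- B-side helper `_fill`
def fillB (a : Char) (j : Nat) (b : Char) : List Char :=
  if a = 'R' ∧ b = 'L' then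
    List.replicate (j / 2) 'R' ++ List.replicate (j % 2) '.' ++ List.replicate (j / 2) 'L'
  else if a = b then List.replicate j a
  else List.replicate j '.'

def dominoes_alt (doms : String) : String :=
  let st := doms.toList.foldl
    (fun (acc : List Char × Char × Nat) c =>
      if c = 'L' ∨ c = 'R' then (acc.1 ++ fillB acc.2.1 acc.2.2 c ++ [c], c, 0)
      else (acc.1, acc.2.1, acc.2.2 + 1))
    ([], 'L', 0)
  String.ofList (st.1 ++ fillB st.2.1 st.2.2 'R')

-- ===== PRECONDITION & SPEC =====
-- A asserts on the empty string; Pre_ excludes exactly that input.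
def Pre_dominoes (doms : String) : Prop := doms ≠ ""
instance (doms : String) : Decidable (Pre_dominoes doms) := by unfold Pre_dominoes; infer_instance
def pvWitness_dominoes : String := ".L.R....L"

-- On strings of length ≥ 2 starting with 'R' followed by a non-'L'/'R' character, A's
-- 'i - 1 > 0' check stops the leading R from pushing anything (A('R.') = 'R.'), while B
-- lets it topple its gap (B('R.') = 'RR'), the intended dominoes behaviour.
def D_dominoes (doms : String) : Prop :=
  2 ≤ doms.toList.length ∧ doms.toList.getD 0 ' ' = 'R' ∧
    ¬(doms.toList.getD 1 ' ' = 'L' ∨ doms.toList.getD 1 ' ' = 'R')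
instance (doms : String) : Decidable (D_dominoes doms) := by unfold D_dominoes; infer_instance

def Spec_dominoes (doms : String) (out : String) : Prop :=
  ¬ D_dominoes doms → out = dominoes_alt doms
instance (doms : String) (out : String) : Decidable (Spec_dominoes doms out) := by
  unfold Spec_dominoes; infer_instance

def pvDiffWitness_dominoes : String := "R."
def pvDiffWitnessOut_dominoes : String × String := ("R.", "RR")

-- ===== CLAIM (what is proved, stated in full; the proofs are below) =====
def Claim_unchanged_dominoes : Prop :=
  ∀ (doms : String), Dom_dominoes doms → Pre_dominoes doms → Spec_dominoes doms (dominoes doms)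
def Claim_changed_dominoes : Prop :=
  Dom_dominoes (pvDiffWitness_dominoes) ∧ Pre_dominoes (pvDiffWitness_dominoes) ∧
    D_dominoes (pvDiffWitness_dominoes) ∧
    dominoes (pvDiffWitness_dominoes) = pvDiffWitnessOut_dominoes.1 ∧
    dominoes_alt (pvDiffWitness_dominoes) = pvDiffWitnessOut_dominoes.2 ∧
    pvDiffWitnessOut_dominoes.1 ≠ pvDiffWitnessOut_dominoes.2
def Claim_exact_dominoes : Prop :=
  ∀ (doms : String), Dom_dominoes doms → Pre_dominoes doms → D_dominoes doms →
    dominoes doms ≠ dominoes_alt doms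

-- ===== LEMMAS AND PROOFS =====

-- window-local cell: p = left neighbour (only its being 'R' matters), q = right neighbour
def cellW (p : Option Char) (c : Char) (q : Option Char) : Char :=
  if c = 'L' ∨ c = 'R' then c
  else if q = some 'L' ∧ p ≠ some 'R' then 'L'
  else if p = some 'R' ∧ q ≠ some 'L' then 'R'
  else '.'

-- one sweep with explicit left context p and virtual right boundary q
def look (t : List Char) (q : Option Char) : Option Char :=
  match t with
  | [] => q
  | d :: _ => some d

def stepW (p : Option Char) (s : List Char) (q : Option Char) : List Char :=
  match s with
  | [] => []
  | c :: t => cellW p c (look t q) :: stepW (some c) t q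

def iterW (k : Nat) (p : Option Char) (s : List Char) (q : Option Char) : List Char :=
  match k with
  | 0 => s
  | k + 1 => iterW k p (stepW p s q) q

-- loop with B-side segment recursion (proof-side mirror of dominoes_alt's fold)
def bseg (a : Char) (r : Nat) (s : List Char) : List Char :=
  match s with
  | [] => fillB a r 'R'
  | c :: t => if c = 'L' ∨ c = 'R' then fillB a r c ++ c :: bseg c 0 t else bseg a (r + 1) t

-- A's sweep with the index-1 quirk: the tail evolves as if its left neighbour were absent
def qstep (xs : List Char) : List Char :=
  match xs with
  | [] => []
  | c :: t => cellW none c t.head? :: stepW none t none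

def loopC : Nat → List Char → List Char
  | 0, xs => xs
  | fuel + 1, xs =>
    let ns := stepW none xs none
    if xs = ns then xs else loopC fuel ns

-- the quirk is invisible iff an 'R' in cell 0 is followed by a pushed domino
def Hq (s : List Char) : Prop :=
  match s with
  | c0 :: c1 :: _ => c0 = 'R' → (c1 = 'L' ∨ c1 = 'R')
  | _ => True

-- no-force predicate for the gaps between pushed dominoes
def NF (u : List Char) : Prop := ∀ c ∈ u, ¬(c = 'L' ∨ c = 'R')

-- left context of A's cell at index |pre|: only 'R' visibility matters, and indices 0,1 see none
def pA (pre : List Char) : Option Char := if 2 ≤ pre.length then pre.getLast? else none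

theorem stepW_p_not_R (s : List Char) (p p' q : Option Char)
    (hp : p ≠ some 'R') (hp' : p' ≠ some 'R') : stepW p s q = stepW p' s q := by
  cases s with
  | nil => rfl
  | cons c t => simp [stepW, cellW, hp, hp']

theorem cellA_zero (c : Char) (t : List Char) :
    cellA (c :: t) 0 c = cellW none c (look t none) := by
  by_cases hf : c = 'L' ∨ c = 'R'
  · simp [cellA, cellW, hf]
  · cases t with
    | nil => simp [cellA, cellW, look, hf, PySem.List.len_eq]
    | cons d t' =>
      have h1 : ((0 : Int) + 1) = ((1 : Nat) : Int) := by norm_num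
      simp only [cellA, if_neg hf, h1, PySem.List.pyGetD_natCast, PySem.List.len_eq]
      simp only [cellW, look, if_neg hf]
      simp [List.getD]

theorem cellA_mid (pre : List Char) (c : Char) (t' : List Char) (h1 : 1 ≤ pre.length) :
    cellA (pre ++ c :: t') (pre.length : Int) c = cellW (pA pre) c (look t' none) := by
  by_cases hf : c = 'L' ∨ c = 'R'
  · simp [cellA, cellW, hf]
  · have hcast : ((pre.length : Int) + 1) = (((pre.length + 1 : Nat)) : Int) := by push_cast; ring
    have hl : (decide ((pre.length : Int) + 1 < PySem.List.len (pre ++ c :: t'))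
        && (PySem.List.pyGetD (pre ++ c :: t') ((pre.length : Int) + 1) ' ' == 'L'))
        = decide (look t' none = some 'L') := by
      cases t' with
      | nil =>
        simp [look, PySem.List.len_eq]
      | cons d rest =>
        have hget : PySem.List.pyGetD (pre ++ c :: d :: rest) ((pre.length : Int) + 1) ' ' = d := by
          rw [hcast, PySem.List.pyGetD_natCast]
          rw [List.getD, List.getElem?_append_right (by omega)]
          simp
        simp [hget, look]
        by_cases hd : d = 'L' <;> simp [hd]
    have hr : (decide ((pre.length : Int) - 1 > 0)
        && (PySem.List.pyGetD (pre ++ c :: t') ((pre.length : Int) - 1) ' ' == 'R'))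
        = decide (pA pre = some 'R') := by
      by_cases h2 : 2 ≤ pre.length
      · have hcast2 : ((pre.length : Int) - 1) = (((pre.length - 1 : Nat)) : Int) := by
          omega
        have hget : PySem.List.pyGetD (pre ++ c :: t') ((pre.length : Int) - 1) ' '
            = pre.getD (pre.length - 1) ' ' := by
          rw [hcast2, PySem.List.pyGetD_natCast]
          rw [List.getD, List.getD, List.getElem?_append_left (by omega)]
        have hlast : pA pre = pre[pre.length - 1]? := by
          rw [pA, if_pos h2, List.getLast?_eq_getElem?]
        rw [hget, hlast]
        have hsome : pre[pre.length - 1]? = some (pre[pre.length - 1]'(by omega)) :=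
          List.getElem?_eq_getElem (by omega)
        rw [hsome]
        simp [List.getD, hsome]
        by_cases hR : pre[pre.length - 1]'(by omega) = 'R' <;> simp [hR] ; omega
      · have hnone : pA pre = none := by rw [pA, if_neg h2]
        simp [hnone]
        intro h
        omega
    simp only [cellA, if_neg hf, hl, hr, cellW]
    by_cases hL : look t' none = some 'L' <;> by_cases hR : pA pre = some 'R' <;>
      simp [hL, hR]

theorem EG : ∀ (t pre : List Char), 1 ≤ pre.length →
    (PySem.List.enumerate t (pre.length : Int)).map (fun p => cellA (pre ++ t) p.1 p.2)
      = stepW (pA pre) t none := by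
  intro t
  induction t with
  | nil => intro pre h; simp [PySem.List.enumerate_nil, stepW]
  | cons c t' ih =>
    intro pre h
    rw [PySem.List.enumerate_cons]
    simp only [List.map_cons]
    have hstep : stepW (pA pre) (c :: t') none
        = cellW (pA pre) c (look t' none) :: stepW (some c) t' none := rfl
    rw [hstep]
    congr 1
    · exact cellA_mid pre c t' h
    · have hc1 : ((pre.length : Int) + 1) = (((pre ++ [c]).length : Nat) : Int) := by
        simp only [List.length_append, List.length_cons, List.length_nil]; push_cast; ring
      have hc2 : pre ++ c :: t' = (pre ++ [c]) ++ t' := by simp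
      rw [hc1, hc2, ih (pre ++ [c]) (by simp)]
      have hpa : pA (pre ++ [c]) = some c := by
        rw [pA, if_pos (by simp; omega)]; exact List.getLast?_concat
      rw [hpa]

theorem stepA_eq_qstep (xs : List Char) : stepA xs = qstep xs := by
  rw [stepA, PySem.List.foldl_append_singleton_eq_map]
  cases xs with
  | nil => rfl
  | cons c t =>
    show (PySem.List.enumerate (c :: t) 0).map (fun p => cellA (c :: t) p.1 p.2)
        = cellW none c t.head? :: stepW none t none
    rw [PySem.List.enumerate_cons]
    simp only [List.map_cons]
    congr 1
    · -- head: index 0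
      have : t.head? = look t none := by cases t <;> rfl
      rw [this]
      exact cellA_zero c t
    · have hc1 : ((0 : Int) + 1) = ((([c] : List Char).length : Nat) : Int) := by simp
      have hc2 : (c :: t) = [c] ++ t := rfl
      rw [hc1, hc2, EG t [c] (by simp)]
      exact stepW_p_not_R t (pA [c]) none none (by simp [pA]) (by simp)

theorem stepW_head_force (c : Char) (t : List Char) (p p' q : Option Char)
    (hc : c = 'L' ∨ c = 'R') : stepW p (c :: t) q = stepW p' (c :: t) q := by
  simp [stepW, cellW, hc]

theorem qstep_eq_cstep (s : List Char) (h : Hq s) : qstep s = stepW none s none := by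
  match s with
  | [] => rfl
  | [c] => rfl
  | c0 :: c1 :: t =>
    show cellW none c0 (some c1) :: stepW none (c1 :: t) none
        = cellW none c0 (some c1) :: stepW (some c0) (c1 :: t) none
    by_cases hc : c0 = 'R'
    · exact congrArg _ (stepW_head_force c1 t none (some c0) none (h hc))
    · exact congrArg _ (stepW_p_not_R (c1 :: t) none (some c0) none (by simp) (by simp [hc]))

theorem cellW_ne_R (c : Char) (q : Option Char) (hc : c ≠ 'R') (p : Option Char)
    (hp : p ≠ some 'R') : cellW p c q ≠ 'R' := by
  unfold cellW
  split_ifs with h1 h2 h3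
  · rcases h1 with rfl | rfl
    · decide
    · exact absurd rfl hc
  · decide
  · exact absurd h3.1 hp
  · decide

theorem cellW_force (p : Option Char) (c : Char) (q : Option Char) (hc : c = 'L' ∨ c = 'R') :
    cellW p c q = c := by simp [cellW, hc]

theorem cellW_dot (p : Option Char) (c : Char) (q : Option Char) (hc : ¬(c = 'L' ∨ c = 'R'))
    (hq : q ≠ some 'L') (hp : p ≠ some 'R') : cellW p c q = '.' := by
  simp [cellW, hc, hq, hp]

theorem cellW_R (c : Char) (q : Option Char) (hc : ¬(c = 'L' ∨ c = 'R'))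
    (hq : q ≠ some 'L') : cellW (some 'R') c q = 'R' := by
  simp [cellW, hc, hq]

theorem Hq_cstep (s : List Char) (h : Hq s) : Hq (stepW none s none) := by
  match s with
  | [] => trivial
  | [c] => trivial
  | c0 :: c1 :: t =>
    show cellW none c0 (some c1) = 'R' → _
    intro h0
    by_cases hc : c0 = 'R'
    · have hf : c1 = 'L' ∨ c1 = 'R' := h hc
      subst hc
      show cellW (some 'R') c1 _ = 'L' ∨ cellW (some 'R') c1 _ = 'R'
      simp [cellW, hf]
    · exact absurd h0 (cellW_ne_R c0 (some c1) hc none (by simp))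

theorem loopA_eq_loopC (fuel : Nat) (s : List Char) (h : Hq s) :
    loopA fuel s = loopC fuel s := by
  induction fuel generalizing s with
  | zero => rfl
  | succ n ih =>
    show (if s = stepA s then s else loopA n (stepA s))
        = (if s = stepW none s none then s else loopC n (stepW none s none))
    rw [stepA_eq_qstep, qstep_eq_cstep s h]
    split
    · rfl
    · exact ih _ (Hq_cstep s h)

theorem iterW_fix (k : Nat) (p : Option Char) (s : List Char) (q : Option Char)
    (h : stepW p s q = s) : iterW k p s q = s := by
  induction k with
  | zero => rfl
  | succ n ih => show iterW n p (stepW p s q) q = s; rw [h]; exact ih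

theorem loopC_eq_iter (fuel : Nat) (s : List Char) :
    loopC fuel s = iterW fuel none s none := by
  induction fuel generalizing s with
  | zero => rfl
  | succ n ih =>
    show (if s = stepW none s none then s else loopC n (stepW none s none))
        = iterW n none (stepW none s none) none
    by_cases hfix : s = stepW none s none
    · rw [if_pos hfix, ← hfix]
      exact (iterW_fix n none s none hfix.symm).symm
    · rw [if_neg hfix]
      exact ih _

theorem iterW_nil (k : Nat) (p q : Option Char) : iterW k p [] q = [] := by
  induction k with
  | zero => rfl
  | succ n ih => exact ih

-- one sweep splits at a pushed domino
theorem stepW_split (x : List Char) (b : Char) (y : List Char) (p q : Option Char)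
    (hb : b = 'L' ∨ b = 'R') :
    stepW p (x ++ b :: y) q = stepW p x (some b) ++ b :: stepW (some b) y q := by
  induction x generalizing p with
  | nil => simp [stepW, cellW, hb]
  | cons c x' ih =>
    show cellW p c _ :: stepW (some c) (x' ++ b :: y) q
        = (cellW p c _ :: stepW (some c) x' (some b)) ++ b :: stepW (some b) y q
    rw [ih]
    cases x' <;> rfl

theorem iterW_split (k : Nat) (x : List Char) (b : Char) (y : List Char) (p q : Option Char)
    (hb : b = 'L' ∨ b = 'R') :
    iterW k p (x ++ b :: y) q = iterW k p x (some b) ++ b :: iterW k (some b) y q := by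
  induction k generalizing x y with
  | zero => rfl
  | succ n ih =>
    show iterW n p (stepW p (x ++ b :: y) q) q = _
    rw [stepW_split x b y p q hb, ih]
    rfl

theorem NF_tail (c : Char) (t : List Char) (hu : NF (c :: t)) : NF t :=
  fun x hx => hu x (List.mem_cons_of_mem _ hx)

theorem NF_head (c : Char) (t : List Char) (hu : NF (c :: t)) : ¬(c = 'L' ∨ c = 'R') :=
  hu c List.mem_cons_self

theorem some_ne_of_head (c : Char) (t : List Char) (hu : NF (c :: t)) (x : Char)
    (hx : x = 'L' ∨ x = 'R') : some c ≠ some x := by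
  have := NF_head c t hu
  intro h
  injection h with h
  subst h
  exact this hx

theorem look_ne_L (t : List Char) (q : Option Char) (hq : q ≠ some 'L')
    (ht : NF t) : look t q ≠ some 'L' := by
  cases t with
  | nil => exact hq
  | cons d t' => exact some_ne_of_head d t' ht 'L' (Or.inl rfl)

theorem stepW_run_dots (u : List Char) (p q : Option Char) (hu : NF u)
    (hp : p ≠ some 'R') (hq : q ≠ some 'L') :
    stepW p u q = List.replicate u.length '.' := by
  induction u generalizing p with
  | nil => rfl
  | cons c t ih =>
    have hc := NF_head c t hu
    show cellW p c _ :: stepW (some c) t q = _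
    rw [ih (some c) (NF_tail c t hu) (some_ne_of_head c t hu 'R' (Or.inr rfl)),
        cellW_dot p c _ hc (look_ne_L t q hq (NF_tail c t hu)) hp]
    rfl

theorem NF_replicate_dots (n : Nat) : NF (List.replicate n '.') := by
  intro c hc
  simp_all [List.eq_of_mem_replicate hc]

theorem iterW_run_dots (k : Nat) (u : List Char) (p q : Option Char) (hu : NF u)
    (hp : p ≠ some 'R') (hq : q ≠ some 'L') (hk : 1 ≤ k) :
    iterW k p u q = List.replicate u.length '.' := by
  induction k generalizing u with
  | zero => omega
  | succ n ih =>
    show iterW n p (stepW p u q) q = _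
    rw [stepW_run_dots u p q hu hp hq]
    cases n with
    | zero => rfl
    | succ m =>
      rw [ih (List.replicate u.length '.') (NF_replicate_dots _) (by omega)]
      simp

theorem stepW_run_pR (u : List Char) (q : Option Char) (hu : NF u) (hq : q ≠ some 'L')
    (hne : u ≠ []) :
    stepW (some 'R') u q = 'R' :: List.replicate (u.length - 1) '.' := by
  cases u with
  | nil => exact absurd rfl hne
  | cons c t =>
    have hc := NF_head c t hu
    show cellW (some 'R') c _ :: stepW (some c) t q = _
    rw [stepW_run_dots t (some c) q (NF_tail c t hu) (some_ne_of_head c t hu 'R' (Or.inr rfl)) hq,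
        cellW_R c _ hc (look_ne_L t q hq (NF_tail c t hu))]
    rfl

theorem iterW_run_pR (n : Nat) : ∀ (u : List Char) (q : Option Char) (k : Nat),
    u.length = n → NF u → q ≠ some 'L' → n ≤ k →
    iterW k (some 'R') u q = List.replicate n 'R' := by
  induction n using Nat.strong_induction_on with
  | _ n ih =>
    intro u q k hlen hu hq hk
    cases u with
    | nil => subst hlen; simp [iterW_nil]
    | cons c t =>
      cases k with
      | zero => simp at hlen; omega
      | succ m =>
        show iterW m (some 'R') (stepW (some 'R') (c :: t) q) q = _
        rw [stepW_run_pR (c :: t) q hu hq (by simp)]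
        simp only [List.length_cons, Nat.add_sub_cancel]
        have : ('R' : Char) :: List.replicate t.length '.' = [] ++ 'R' :: List.replicate t.length '.' := rfl
        rw [this, iterW_split m [] 'R' (List.replicate t.length '.') (some 'R') q (Or.inr rfl)]
        rw [iterW_nil, ih t.length (by subst hlen; simp) (List.replicate t.length '.') q m (by simp)
            (NF_replicate_dots _) hq (by subst hlen; simp at hk ⊢; omega)]
        subst hlen
        simp [List.replicate_succ]

theorem stepW_run_qL (u : List Char) (p : Option Char) (hu : NF u) (hp : p ≠ some 'R')
    (hne : u ≠ []) :
    stepW p u (some 'L') = List.replicate (u.length - 1) '.' ++ ['L'] := by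
  induction u generalizing p with
  | nil => exact absurd rfl hne
  | cons c t ih =>
    have hc := NF_head c t hu
    cases t with
    | nil => simp [stepW, cellW, look, hc, hp]
    | cons d t' =>
      show cellW p c (some d) :: stepW (some c) (d :: t') (some 'L') = _
      rw [ih (some c) (NF_tail c _ hu) (some_ne_of_head c _ hu 'R' (Or.inr rfl)) (by simp),
          cellW_dot p c (some d) hc (some_ne_of_head d t' (NF_tail c _ hu) 'L' (Or.inl rfl)) hp]
      simp [List.replicate_succ]

theorem iterW_run_qL (n : Nat) : ∀ (u : List Char) (p : Option Char) (k : Nat),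
    u.length = n → NF u → p ≠ some 'R' → n ≤ k →
    iterW k p u (some 'L') = List.replicate n 'L' := by
  induction n using Nat.strong_induction_on with
  | _ n ih =>
    intro u p k hlen hu hp hk
    cases u with
    | nil => subst hlen; simp [iterW_nil]
    | cons c t =>
      cases k with
      | zero => simp at hlen; omega
      | succ m =>
        show iterW m p (stepW p (c :: t) (some 'L')) (some 'L') = _
        rw [stepW_run_qL (c :: t) p hu hp (by simp)]
        simp only [List.length_cons, Nat.add_sub_cancel]
        rw [show List.replicate t.length '.' ++ ['L']
              = List.replicate t.length '.' ++ 'L' :: [] from rfl]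
        rw [iterW_split m (List.replicate t.length '.') 'L' [] p (some 'L') (Or.inl rfl)]
        rw [iterW_nil, ih t.length (by subst hlen; simp) (List.replicate t.length '.') p m (by simp)
            (NF_replicate_dots _) hp (by subst hlen; simp at hk ⊢; omega)]
        subst hlen
        simp [← List.replicate_succ']

theorem iterW_run_RL (n : Nat) : ∀ (u : List Char) (k : Nat),
    u.length = n → NF u → n ≤ k →
    iterW k (some 'R') u (some 'L')
      = List.replicate (n / 2) 'R' ++ List.replicate (n % 2) '.' ++ List.replicate (n / 2) 'L' := by
  induction n using Nat.strong_induction_on with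
  | _ n ih =>
    intro u k hlen hu hk
    match u with
    | [] => subst hlen; simp [iterW_nil]
    | [c] =>
      have hc : ¬(c = 'L' ∨ c = 'R') := hu c (by simp)
      cases k with
      | zero => simp at hlen; omega
      | succ m =>
        show iterW m (some 'R') (stepW (some 'R') [c] (some 'L')) (some 'L') = _
        have h1 : stepW (some 'R') [c] (some 'L') = ['.'] := by simp [stepW, cellW, look, hc]
        rw [h1, iterW_fix m _ _ _ (by simp [stepW, cellW, look])]
        subst hlen; simp
    | c :: d :: t =>
      have hc : ¬(c = 'L' ∨ c = 'R') := hu c (by simp)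
      have hd : ¬(d = 'L' ∨ d = 'R') := hu d (by simp)
      cases k with
      | zero => simp at hlen; omega
      | succ m =>
        show iterW m (some 'R') (stepW (some 'R') (c :: d :: t) (some 'L')) (some 'L') = _
        have h1 : stepW (some 'R') (c :: d :: t) (some 'L')
            = 'R' :: (List.replicate t.length '.' ++ ['L']) := by
          show cellW (some 'R') c (some d) :: stepW (some c) (d :: t) (some 'L') = _
          rw [stepW_run_qL (d :: t) (some c) (fun x hx => hu x (by simp [hx]))
              (by simp; intro h; exact hc (Or.inr h)) (by simp)]
          have : ¬(some d = some 'L') := by simp; intro h; exact hd (Or.inl h)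
          simp [cellW, hc, this]
        rw [h1]
        rw [show ('R' : Char) :: (List.replicate t.length '.' ++ ['L'])
              = [] ++ 'R' :: (List.replicate t.length '.' ++ 'L' :: []) from rfl]
        rw [iterW_split m [] 'R' _ (some 'R') (some 'L') (Or.inr rfl), iterW_nil]
        rw [iterW_split m (List.replicate t.length '.') 'L' [] (some 'R') (some 'L') (Or.inl rfl), iterW_nil]
        rw [ih t.length (by subst hlen; simp) (List.replicate t.length '.') m (by simp)
            (NF_replicate_dots _) (by subst hlen; simp at hk ⊢; omega)]
        subst hlen
        have h2 : (t.length + 1 + 1) / 2 = t.length / 2 + 1 := by omega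
        have h3 : (t.length + 1 + 1) % 2 = t.length % 2 := by omega
        have h4 : ∀ (n : Nat) (a : Char), List.replicate n a ++ [a] = a :: List.replicate n a := by
          intro n a; rw [← List.replicate_succ', List.replicate_succ]
        simp only [List.length_cons, h2, h3, List.replicate_succ]
        simp [h4]

theorem split_forces (s : List Char) :
    NF s ∨ ∃ u b t, s = u ++ b :: t ∧ NF u ∧ (b = 'L' ∨ b = 'R') := by
  induction s with
  | nil => left; intro c hc; simp at hc
  | cons c t ih =>
    by_cases hc : c = 'L' ∨ c = 'R'
    · right; exact ⟨[], c, t, rfl, fun x hx => by simp at hx, hc⟩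
    · rcases ih with h | ⟨u, b, t', rfl, hu, hb⟩
      · left; intro x hx
        rcases List.mem_cons.1 hx with rfl | hx
        · exact hc
        · exact h x hx
      · right
        refine ⟨c :: u, b, t', rfl, ?_, hb⟩
        intro x hx
        rcases List.mem_cons.1 hx with rfl | hx
        · exact hc
        · exact hu x hx

theorem fillB_length (a : Char) (j : Nat) (b : Char) : (fillB a j b).length = j := by
  unfold fillB; split_ifs <;> simp ; omega

theorem fillB_zero (a b : Char) : fillB a 0 b = [] := by
  unfold fillB; split_ifs <;> simp

theorem bseg_run (u : List Char) (hu : NF u) : ∀ (a : Char) (r : Nat),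
    bseg a r u = fillB a (r + u.length) 'R' := by
  induction u with
  | nil => intro a r; simp [bseg]
  | cons c t ih =>
    intro a r
    have hc : ¬(c = 'L' ∨ c = 'R') := hu c (by simp)
    show (if c = 'L' ∨ c = 'R' then _ else bseg a (r + 1) t) = _
    rw [if_neg hc, ih (fun x hx => hu x (by simp [hx]))]
    congr 1
    simp; omega

theorem bseg_split (u : List Char) (hu : NF u) (b : Char) (hb : b = 'L' ∨ b = 'R')
    (t : List Char) : ∀ (a : Char) (r : Nat),
    bseg a r (u ++ b :: t) = fillB a (r + u.length) b ++ b :: bseg b 0 t := by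
  induction u with
  | nil => intro a r; simp [bseg, hb]
  | cons c u' ih =>
    intro a r
    have hc : ¬(c = 'L' ∨ c = 'R') := hu c (by simp)
    show (if c = 'L' ∨ c = 'R' then _ else bseg a (r + 1) (u' ++ b :: t)) = _
    rw [if_neg hc, ih (fun x hx => hu x (by simp [hx]))]
    congr 2
    simp; omega

theorem core (s : List Char) : ∀ (a : Char) (p : Option Char) (k : Nat),
    (a = 'R' ↔ p = some 'R') → (a = 'L' ∨ a = 'R') → s.length + 1 ≤ k →
    iterW k p s none = bseg a 0 s := by
  induction hn : s.length using Nat.strong_induction_on generalizing s with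
  | _ n ih =>
    intro a p k hiff ha hk
    subst hn
    rcases split_forces s with hnf | ⟨u, b, t, rfl, hu, hb⟩
    · rw [bseg_run s hnf a 0]
      by_cases hp : p = some 'R'
      · have haR : a = 'R' := hiff.2 hp
        subst hp haR
        rw [iterW_run_pR s.length s none k rfl hnf (by simp) (by omega)]
        simp [fillB]
      · have haL : a = 'L' := by rcases ha with h | h; exact h; exact absurd (hiff.1 h) hp
        subst haL
        rw [iterW_run_dots k s p none hnf hp (by simp) (by omega)]
        simp [fillB]
    · rw [iterW_split k u b t p none hb,
          bseg_split u hu b hb t a 0,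
          ih t.length (by simp; omega) t rfl b (some b) k (by simp) hb (by simp at hk ⊢; omega)]
      congr 1
      simp only [Nat.zero_add]
      by_cases hp : p = some 'R'
      · have haR : a = 'R' := hiff.2 hp
        subst hp haR
        rcases hb with rfl | rfl
        · rw [iterW_run_RL u.length u k rfl hu (by simp at hk ⊢; omega)]
          simp [fillB]
        · rw [iterW_run_pR u.length u (some 'R') k rfl hu (by simp) (by simp at hk ⊢; omega)]
          simp [fillB]
      · have haL : a = 'L' := by rcases ha with h | h; exact h; exact absurd (hiff.1 h) hp
        subst haL
        rcases hb with rfl | rfl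
        · rw [iterW_run_qL u.length u p k rfl hu hp (by simp at hk ⊢; omega)]
          simp [fillB]
        · rw [iterW_run_dots k u p (some 'R') hu hp (by simp) (by omega)]
          simp [fillB]

theorem foldB (s : List Char) : ∀ (st : List Char × Char × Nat),
    (s.foldl (fun (acc : List Char × Char × Nat) c =>
        if c = 'L' ∨ c = 'R' then (acc.1 ++ fillB acc.2.1 acc.2.2 c ++ [c], c, 0)
        else (acc.1, acc.2.1, acc.2.2 + 1)) st).1
      ++ fillB (s.foldl (fun (acc : List Char × Char × Nat) c =>
        if c = 'L' ∨ c = 'R' then (acc.1 ++ fillB acc.2.1 acc.2.2 c ++ [c], c, 0)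
        else (acc.1, acc.2.1, acc.2.2 + 1)) st).2.1
        (s.foldl (fun (acc : List Char × Char × Nat) c =>
        if c = 'L' ∨ c = 'R' then (acc.1 ++ fillB acc.2.1 acc.2.2 c ++ [c], c, 0)
        else (acc.1, acc.2.1, acc.2.2 + 1)) st).2.2 'R'
      = st.1 ++ bseg st.2.1 st.2.2 s := by
  induction s with
  | nil => intro st; rfl
  | cons c t ih =>
    intro st
    by_cases hc : c = 'L' ∨ c = 'R'
    · simp only [List.foldl_cons, if_pos hc, ih]
      show (st.1 ++ fillB st.2.1 st.2.2 c ++ [c]) ++ bseg c 0 t = st.1 ++ bseg st.2.1 st.2.2 (c :: t)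
      show _ = st.1 ++ (if c = 'L' ∨ c = 'R' then fillB st.2.1 st.2.2 c ++ c :: bseg c 0 t else _)
      rw [if_pos hc]
      simp
    · simp only [List.foldl_cons, if_neg hc, ih]
      show st.1 ++ bseg st.2.1 (st.2.2 + 1) t = st.1 ++ bseg st.2.1 st.2.2 (c :: t)
      show _ = st.1 ++ (if c = 'L' ∨ c = 'R' then _ else bseg st.2.1 (st.2.2 + 1) t)
      rw [if_neg hc]

theorem alt_eq_bseg (doms : String) :
    dominoes_alt doms = String.ofList (bseg 'L' 0 doms.toList) := by
  show String.ofList _ = _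
  rw [foldB doms.toList ([], 'L', 0)]
  rfl
-- ===== VERDICT (by name: the statement is the Claim_ definition above) =====
theorem Hq_of_not_D (doms : String) (hnd : ¬ D_dominoes doms) : Hq doms.toList := by
  cases hl : doms.toList with
  | nil => trivial
  | cons c0 t0 =>
    cases t0 with
    | nil => trivial
    | cons c1 t1 =>
      intro hc0
      rw [D_dominoes, hl] at hnd
      simp [List.getD, hc0] at hnd
      by_cases hL : c1 = 'L'
      · exact Or.inl hL
      · exact Or.inr (by tauto)

theorem cons_ne_of_ne {x : Char} {l1 l2 : List Char} (h : l1 ≠ l2) :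
    String.ofList (x :: l1) ≠ String.ofList (x :: l2) := by
  intro he
  apply h
  have := congrArg String.toList he
  simpa using this

theorem dominoes_spec : Claim_unchanged_dominoes := by
  intro doms _ _ hnd
  show String.ofList (loopA (doms.toList.length + 2) doms.toList) = dominoes_alt doms
  rw [loopA_eq_loopC _ _ (Hq_of_not_D doms hnd), loopC_eq_iter, alt_eq_bseg]
  congr 1
  exact core doms.toList 'L' none (doms.toList.length + 2) (by simp) (Or.inl rfl) (by omega)

theorem dominoes_changed : Claim_changed_dominoes := by
  unfold Claim_changed_dominoes; decide

theorem loopA_consR (fuel : Nat) : ∀ (t : List Char),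
    loopA fuel ('R' :: t) = 'R' :: loopC fuel t := by
  induction fuel with
  | zero => intro t; rfl
  | succ n ih =>
    intro t
    have hs : stepA ('R' :: t) = 'R' :: stepW none t none := by
      rw [stepA_eq_qstep]
      show cellW none 'R' t.head? :: stepW none t none = _
      rw [cellW_force none 'R' t.head? (Or.inr rfl)]
    show (if 'R' :: t = stepA ('R' :: t) then 'R' :: t else loopA n (stepA ('R' :: t)))
        = 'R' :: (if t = stepW none t none then t else loopC n (stepW none t none))
    rw [hs]
    by_cases hfix : t = stepW none t none
    · rw [if_pos (by rw [← hfix]), if_pos hfix]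
    · rw [if_neg (by simp [hfix]), if_neg hfix, ih]

theorem bseg_LR_ne (t : List Char) (c1 : Char) (t1 : List Char) (ht : t = c1 :: t1)
    (h1 : ¬(c1 = 'L' ∨ c1 = 'R')) : bseg 'L' 0 t ≠ bseg 'R' 0 t := by
  rcases split_forces t with hnf | ⟨u, b, t', rfl, hu, hb⟩
  · rw [bseg_run t hnf 'L' 0, bseg_run t hnf 'R' 0]
    subst ht
    simp [fillB, List.replicate_succ]
  · cases u with
    | nil =>
      simp only [List.nil_append] at ht
      injection ht with hbc _
      subst hbc
      exact (h1 hb).elim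
    | cons c u' =>
      rw [bseg_split (c :: u') hu b hb t' 'L' 0, bseg_split (c :: u') hu b hb t' 'R' 0]
      intro he
      have hlen : 0 < (fillB 'L' (0 + (c :: u').length) b).length := by
        rw [fillB_length]; simp
      have hlen' : 0 < (fillB 'R' (0 + (c :: u').length) b).length := by
        rw [fillB_length]; simp
      have h0 := congrArg (fun l => l[0]?) he
      simp only at h0
      rw [List.getElem?_append_left hlen, List.getElem?_append_left hlen'] at h0
      have hj1' : 1 ≤ 0 + (c :: u').length := by simp
      set j := 0 + (c :: u').length with hj
      have hj1 : 1 ≤ j := hj1'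
      have hrep : ∀ (n : Nat) (a : Char), 1 ≤ n → (List.replicate n a)[0]? = some a := by
        intro n a hn
        rw [List.getElem?_replicate, if_pos (by omega)]
      rcases hb with rfl | rfl
      · -- b = 'L'
        have hL : (fillB 'L' j 'L')[0]? = some 'L' := by
          rw [show fillB 'L' j 'L' = List.replicate j 'L' by simp [fillB]]
          exact hrep j 'L' hj1
        rcases Nat.lt_or_ge j 2 with hj2 | hj2
        · have : j = 1 := by omega
          rw [this] at h0 hL
          rw [hL] at h0
          simp [fillB] at h0
        · have hR : (fillB 'R' j 'L')[0]? = some 'R' := by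
            have : (fillB 'R' j 'L') = 'R' :: (List.replicate (j / 2 - 1) 'R'
                ++ List.replicate (j % 2) '.' ++ List.replicate (j / 2) 'L') := by
              simp [fillB]
              rw [show j / 2 = (j / 2 - 1) + 1 by omega, List.replicate_succ]
              simp
            rw [this]
            rfl
          rw [hL, hR] at h0
          simp at h0
      · -- b = 'R'
        have hL : (fillB 'L' j 'R')[0]? = some '.' := by
          rw [show fillB 'L' j 'R' = List.replicate j '.' by simp [fillB]]
          exact hrep j '.' hj1
        have hR : (fillB 'R' j 'R')[0]? = some 'R' := by
          rw [show fillB 'R' j 'R' = List.replicate j 'R' by simp [fillB]]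
          exact hrep j 'R' hj1
        rw [hL, hR] at h0
        simp at h0

theorem dominoes_tight : Claim_exact_dominoes := by
  intro doms _ _ hd
  obtain ⟨h2, h0, h1⟩ := hd
  rcases hl : doms.toList with _ | ⟨c0, _ | ⟨c1, t1⟩⟩
  · rw [hl] at h2; simp at h2
  · rw [hl] at h2; simp at h2
  · rw [hl] at h0 h1
    simp only [List.getD, List.getElem?_cons_zero, Option.getD_some] at h0
    simp only [List.getD, List.getElem?_cons_succ, List.getElem?_cons_zero,
      Option.getD_some] at h1
    subst h0
    show String.ofList (loopA (doms.toList.length + 2) doms.toList) ≠ dominoes_alt doms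
    rw [alt_eq_bseg, hl, loopA_consR, loopC_eq_iter,
        core (c1 :: t1) 'L' none _ (by simp) (Or.inl rfl) (by simp)]
    have halt : bseg 'L' 0 ('R' :: c1 :: t1) = 'R' :: bseg 'R' 0 (c1 :: t1) := by
      show (if ('R' : Char) = 'L' ∨ ('R' : Char) = 'R' then
          fillB 'L' 0 'R' ++ 'R' :: bseg 'R' 0 (c1 :: t1) else _) = _
      rw [if_pos (Or.inr rfl), fillB_zero]
      rfl
    rw [halt]
    exact cons_ne_of_ne (bseg_LR_ne (c1 :: t1) c1 t1 rfl h1)
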